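-- pv_equiv track=rewrite | github.com/tanishpatel0106/portfolio-rebalancing | macro_stresslab/stresslab/analytics/regimes.py | _segment_labels
-- ===== SOURCE A (Python) =====
-- from typing import Dict, Iterable, List, Literal, Optional, Sequence, Tuple, Union
--
-- RegimeLabels = Tuple[str, str, str]  # (low, mid, high) e.g. ("Calm","Normal","Stress")
--
-- def _run_length_encode(labels: Sequence[str]) -> List[Tuple[int, int, str]]:
--     """
--     Return list of (start_idx, end_idx_inclusive, label) runs.
--     """
--     if len(labels) == 0:
--         return []
--     runs: List[Tuple[int, int, str]] = []
--     start = 0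
--     cur = labels[0]
--     for i in range(1, len(labels)):
--         if labels[i] != cur:
--             runs.append((start, i - 1, cur))
--             start = i
--             cur = labels[i]
--     runs.append((start, len(labels) - 1, cur))
--     return runs
--
-- def _segment_labels(base_labels: Sequence[str], labels: RegimeLabels) -> Tuple[List[str], List[str]]:
--     """
--     Convert base labels into segment-aware labels.
--
--     Example:
--       base:  Calm Calm Normal Normal Stress Stress Normal ...
--       seg :  Calm#01 Calm#01 Normal#01 Normal#01 Stress#01 Stress#01 Normal#02 ...
--
--     Returns:
--       segment_labels, base_labels_copy
--     """
--     base = list(base_labels)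
--     seg = []
--     counters = {labels[0]: 0, labels[1]: 0, labels[2]: 0}
--
--     runs = _run_length_encode(base)
--     for (s, e, lab) in runs:
--         counters[lab] = counters.get(lab, 0) + 1
--         tag = f"{lab}#{counters[lab]:02d}"
--         seg.extend([tag] * (e - s + 1))
--
--     return seg, base
-- ===== SOURCE B (Python) =====
-- def _segment_labels(base_labels, labels):
--     """Single pass over base_labels: fuse run detection and tag emission,
--     no intermediate runs list."""
--     base = list(base_labels)
--     counters = {labels[0]: 0, labels[1]: 0, labels[2]: 0}
--     seg = []
--     prev = None
--     tag = ""
--     for lab in base: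
--         if prev is None or lab != prev:
--             counters[lab] = counters.get(lab, 0) + 1
--             tag = f"{lab}#{counters[lab]:02d}"
--             prev = lab
--         seg.append(tag)
--     return seg, base
-- ===== Notes on version B (the rewrite author's own statement) =====
-- stated objective: simpler
-- what changed: Replaced the two-phase run-length-encode-then-expand (building an intermediate list of (start,end,label) runs) by a single fused pass that tracks the previous label and emits the tag element by element.
import Mathlib
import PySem

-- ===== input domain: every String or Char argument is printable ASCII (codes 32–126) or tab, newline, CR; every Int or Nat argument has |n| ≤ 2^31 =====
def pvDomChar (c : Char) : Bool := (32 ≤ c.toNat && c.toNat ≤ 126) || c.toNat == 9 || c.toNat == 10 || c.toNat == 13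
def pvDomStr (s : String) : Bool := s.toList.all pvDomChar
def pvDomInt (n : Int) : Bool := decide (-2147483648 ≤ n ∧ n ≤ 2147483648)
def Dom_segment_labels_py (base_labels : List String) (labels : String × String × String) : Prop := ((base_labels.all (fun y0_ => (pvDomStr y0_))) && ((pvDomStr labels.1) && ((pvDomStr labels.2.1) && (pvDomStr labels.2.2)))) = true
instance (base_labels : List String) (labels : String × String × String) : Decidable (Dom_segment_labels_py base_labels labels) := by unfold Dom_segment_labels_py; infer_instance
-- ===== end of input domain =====

-- B fuses A's run-length-encode-then-expand two-phase pass into one pass that tracks the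
-- previous label and emits the tag per element (objective: simpler; return value only).

-- f"{n:02d}" for the counter values reached here (exact for any Int of width ≥ 1 digit):
def pyFmt02 (n : Int) : String :=
  if 0 ≤ n ∧ n < 10 then "0" ++ PySem.Int.toStr n else PySem.Int.toStr n

-- ===== PORT A =====
-- _run_length_encode; labels[0] and labels[i] are guarded in range, so pyGetD is exact.
def run_length_encode_py (labels : List String) : List (Int × Int × String) :=
  if labels.length = 0 then []
  else
    let st := (PySem.List.pyRange 1 (labels.length : Int) 1).foldl
      (fun (acc : List (Int × Int × String) × Int × String) i =>
        if PySem.List.pyGetD labels i "" ≠ acc.2.2 then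
          (acc.1 ++ [(acc.2.1, i - 1, acc.2.2)], i, PySem.List.pyGetD labels i "")
        else acc)
      ([], 0, PySem.List.pyGetD labels 0 "")
    st.1 ++ [(st.2.1, (labels.length : Int) - 1, st.2.2)]

def segment_labels_py (base_labels : List String) (labels : String × String × String) : List String × List String :=
  let base := base_labels
  let counters : PySem.Dict String Int :=
    ((PySem.Dict.empty.insert labels.1 0).insert labels.2.1 0).insert labels.2.2 0
  let runs := run_length_encode_py base
  let st := runs.foldl
    (fun (acc : List String × PySem.Dict String Int) r =>
      let c := acc.2.getD r.2.2 0 + 1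
      (acc.1 ++ List.replicate (r.2.1 - r.1 + 1).toNat (r.2.2 ++ "#" ++ pyFmt02 c),
       acc.2.insert r.2.2 c))
    ([], counters)
  (st.1, base)

-- ===== PORT B =====
def segment_labels_py_alt (base_labels : List String) (labels : String × String × String) : List String × List String :=
  let counters0 : PySem.Dict String Int :=
    ((PySem.Dict.empty.insert labels.1 0).insert labels.2.1 0).insert labels.2.2 0
  let st := base_labels.foldl
    (fun (acc : List String × PySem.Dict String Int × Option String × String) lab =>
      if acc.2.2.1 ≠ some lab then          -- prev is None or lab != prev
        let c := acc.2.1.getD lab 0 + 1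
        let tag := lab ++ "#" ++ pyFmt02 c
        (acc.1 ++ [tag], acc.2.1.insert lab c, some lab, tag)
      else (acc.1 ++ [acc.2.2.2], acc.2))
    ([], counters0, none, "")
  (st.1, base_labels)

-- ===== PRECONDITION & SPEC =====
def Spec_segment_labels_py (base_labels : List String) (labels : String × String × String) (out : List String × List String) : Prop := out = segment_labels_py_alt base_labels labels
instance (base_labels : List String) (labels : String × String × String) (out : List String × List String) : Decidable (Spec_segment_labels_py base_labels labels out) := by unfold Spec_segment_labels_py; infer_instance

-- ===== CLAIM (what is proved, stated in full; the proofs are below) =====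
def Claim_equal_segment_labels_py : Prop := ∀ (base_labels : List String) (labels : String × String × String), Dom_segment_labels_py base_labels labels → Spec_segment_labels_py base_labels labels (segment_labels_py base_labels labels)

-- ===== LEMMAS AND PROOFS =====

-- structural form of A's rle loop over the remaining suffix, carrying the index
def loopA (rest : List String) (i : Nat) (st : List (Int × Int × String) × Int × String) :
    List (Int × Int × String) × Int × String :=
  match rest with
  | [] => st
  | x :: xs =>
    if x ≠ st.2.2 then loopA xs (i+1) (st.1 ++ [(st.2.1, (i:Int) - 1, st.2.2)], (i:Int), x)
    else loopA xs (i+1) st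

-- abstract run list: (label, run length)
def rleN (cur : String) (k : Nat) : List String → List (String × Nat)
  | [] => [(cur, k)]
  | x :: xs => if x = cur then rleN cur (k+1) xs else (cur, k) :: rleN x 1 xs

def mkTag (lab : String) (c : Int) : String := lab ++ "#" ++ pyFmt02 c

-- B's loop written as a cons-producing recursion
def segBAux (counters : PySem.Dict String Int) (prev : Option String) (tag : String) :
    List String → List String
  | [] => []
  | x :: xs =>
    if prev ≠ some x then
      let c := counters.getD x 0 + 1
      mkTag x c :: segBAux (counters.insert x c) (some x) (mkTag x c) xs
    else tag :: segBAux counters prev tag xs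

-- A's index fold over pyRange equals loopA on the suffix
theorem foldA_eq_loopA (labels : List String) (i : Nat) (hi : i ≤ labels.length)
    (st : List (Int × Int × String) × Int × String) :
    (PySem.List.pyRange (i : Int) (labels.length : Int) 1).foldl
      (fun (acc : List (Int × Int × String) × Int × String) j =>
        if PySem.List.pyGetD labels j "" ≠ acc.2.2 then
          (acc.1 ++ [(acc.2.1, j - 1, acc.2.2)], j, PySem.List.pyGetD labels j "")
        else acc) st
    = loopA (labels.drop i) i st := by
  by_cases h : i < labels.length
  · rw [PySem.List.pyRange_one_cons (by exact_mod_cast h)]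
    have hget : PySem.List.pyGetD labels (i : Int) "" = labels[i] := by
      rw [PySem.List.pyGetD_natCast]; exact List.getD_eq_getElem _ _ h
    rw [List.foldl_cons]
    have hc : ((i : Int) + 1) = ((i + 1 : Nat) : Int) := by push_cast; ring
    rw [hc, foldA_eq_loopA labels (i+1) h _]
    rw [List.drop_eq_getElem_cons h]
    simp only [loopA, hget]
    split <;> rfl
  · have : i = labels.length := le_antisymm hi (not_lt.mp h)
    subst this
    rw [PySem.List.pyRange_one_eq_nil (le_refl _)]
    simp [loopA]
termination_by labels.length - i

-- finalized loopA, mapped to (label, length), is rleN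
theorem loopA_spec (rest : List String) (i start : Nat) (h : start ≤ i) (cur : String)
    (runs : List (Int × Int × String)) :
    ((loopA rest i (runs, (start : Int), cur)).1 ++
        [((loopA rest i (runs, (start : Int), cur)).2.1, ((i + rest.length : Nat) : Int) - 1,
          (loopA rest i (runs, (start : Int), cur)).2.2)]).map
      (fun r => (r.2.2, (r.2.1 - r.1 + 1).toNat))
    = runs.map (fun r => (r.2.2, (r.2.1 - r.1 + 1).toNat)) ++ rleN cur (i - start) rest := by
  induction rest generalizing i start cur runs with
  | nil =>
    simp only [loopA, rleN, List.length_nil, Nat.add_zero, List.map_append, List.map_cons,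
      List.map_nil]
    congr 2
    have : ((i : Int) - 1 - (start : Int) + 1).toNat = i - start := by omega
    simp [this]
  | cons x xs ih =>
    simp only [loopA]
    by_cases hx : x = cur
    · subst hx
      rw [if_neg (by simp)]
      have h' := ih (i+1) start (by omega) x runs
      simp only [List.length_cons] at h' ⊢
      rw [show i + 1 + xs.length = i + (xs.length + 1) by omega] at h'
      rw [h', show rleN x (i - start) (x :: xs) = rleN x (i - start + 1) xs from by simp [rleN],
        show i + 1 - start = i - start + 1 by omega]
    · rw [if_pos (by simpa using hx)]
      have h' := ih (i+1) i (by omega) x (runs ++ [((start : Int), (i : Int) - 1, cur)])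
      simp only [List.length_cons] at h' ⊢
      rw [show i + 1 + xs.length = i + (xs.length + 1) by omega] at h'
      rw [h']
      have h1 : ((i : Int) - 1 - (start : Int) + 1).toNat = i - start := by omega
      have h2 : rleN cur (i - start) (x :: xs) = (cur, i - start) :: rleN x 1 xs := by
        simp [rleN, hx]
      simp [h2, h1]

-- A's expansion fold only consumes each run through (label, length)
def expandN (st : List String × PySem.Dict String Int) (runs : List (String × Nat)) :
    List String × PySem.Dict String Int :=
  runs.foldl
    (fun acc r =>
      let c := acc.2.getD r.1 0 + 1
      (acc.1 ++ List.replicate r.2 (mkTag r.1 c), acc.2.insert r.1 c)) st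

theorem expand_eq_expandN (runs : List (Int × Int × String))
    (st : List String × PySem.Dict String Int) :
    runs.foldl
      (fun (acc : List String × PySem.Dict String Int) r =>
        let c := acc.2.getD r.2.2 0 + 1
        (acc.1 ++ List.replicate (r.2.1 - r.1 + 1).toNat (r.2.2 ++ "#" ++ pyFmt02 c),
         acc.2.insert r.2.2 c)) st
    = expandN st (runs.map (fun r => (r.2.2, (r.2.1 - r.1 + 1).toNat))) := by
  unfold expandN
  rw [List.foldl_map]
  rfl

-- A's _run_length_encode on a nonempty list, in structural form
theorem rle_cons (l0 : String) (xs : List String) :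
    run_length_encode_py (l0 :: xs)
    = (loopA xs 1 ([], 0, l0)).1 ++
        [((loopA xs 1 ([], 0, l0)).2.1, ((xs.length + 1 : Nat) : Int) - 1,
          (loopA xs 1 ([], 0, l0)).2.2)] := by
  unfold run_length_encode_py
  rw [if_neg (by simp)]
  have hget0 : PySem.List.pyGetD (l0 :: xs) (0 : Int) "" = l0 := by
    have := PySem.List.pyGetD_natCast (l0 :: xs) 0 ""
    simpa using this
  have hfold := foldA_eq_loopA (l0 :: xs) 1 (by simp) ([], ((0 : Nat) : Int), l0)
  simp only [Nat.cast_one, Nat.cast_zero, List.drop_succ_cons, List.drop_zero,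
    List.length_cons] at hfold
  simp only [hget0, List.length_cons]
  rw [hfold]

-- fusion: expanding the abstract runs = B's per-element pass, one run in flight
theorem fuse (rest : List String) (cur : String) (k : Nat) (counters : PySem.Dict String Int)
    (seg : List String) :
    (expandN (seg, counters) (rleN cur k rest)).1
    = seg ++ List.replicate k (mkTag cur (counters.getD cur 0 + 1))
        ++ segBAux (counters.insert cur (counters.getD cur 0 + 1)) (some cur)
             (mkTag cur (counters.getD cur 0 + 1)) rest := by
  induction rest generalizing cur k counters seg with
  | nil => simp [rleN, expandN, segBAux]
  | cons x xs ih =>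
    by_cases hx : x = cur
    · subst hx
      have h1 : rleN x k (x :: xs) = rleN x (k+1) xs := by simp [rleN]
      rw [h1, ih]
      simp [segBAux, List.replicate_succ']
    · have h1 : rleN cur k (x :: xs) = (cur, k) :: rleN x 1 xs := by simp [rleN, hx]
      rw [h1]
      have h2 : expandN (seg, counters) ((cur, k) :: rleN x 1 xs)
          = expandN (seg ++ List.replicate k (mkTag cur (counters.getD cur 0 + 1)),
              counters.insert cur (counters.getD cur 0 + 1)) (rleN x 1 xs) := by
        simp [expandN]
      rw [h2, ih]
      have hne : some cur ≠ some x := by simpa using fun h => hx h.symm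
      simp [segBAux, hne]

-- B's foldl equals the cons recursion segBAux
theorem altFold (rest : List String) (seg : List String) (counters : PySem.Dict String Int)
    (prev : Option String) (tag : String) :
    (rest.foldl
      (fun (acc : List String × PySem.Dict String Int × Option String × String) lab =>
        if acc.2.2.1 ≠ some lab then
          let c := acc.2.1.getD lab 0 + 1
          let tag := lab ++ "#" ++ pyFmt02 c
          (acc.1 ++ [tag], acc.2.1.insert lab c, some lab, tag)
        else (acc.1 ++ [acc.2.2.2], acc.2)) (seg, counters, prev, tag)).1
    = seg ++ segBAux counters prev tag rest := by
  induction rest generalizing seg counters prev tag with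
  | nil => simp [segBAux]
  | cons x xs ih =>
    by_cases hp : prev ≠ some x
    · simp only [List.foldl_cons, segBAux, if_pos hp]
      rw [ih]
      simp [mkTag]
    · simp only [List.foldl_cons, segBAux, if_neg hp]
      rw [ih]
      simp

-- ===== VERDICT (by name: the statement is the Claim_ definition above) =====
theorem segment_labels_py_spec : Claim_equal_segment_labels_py := by
  intro base_labels labels _
  unfold Spec_segment_labels_py segment_labels_py segment_labels_py_alt
  cases base_labels with
  | nil => simp [run_length_encode_py]
  | cons l0 xs =>
    simp only
    congr 1
    rw [altFold, rle_cons, expand_eq_expandN]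
    have hspec := loopA_spec xs 1 0 (by omega) l0 []
    simp only [Nat.cast_zero, Nat.sub_zero, List.map_nil, List.nil_append,
      Nat.add_comm 1 xs.length] at hspec
    rw [hspec, fuse]
    have hne : (none : Option String) ≠ some l0 := by simp
    simp [segBAux, hne, mkTag]
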